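-- pv_equiv track=rewrite | github.com/nathan-au/team-QTON-pharmahacks-2025 | pickler2/pickletest.py | apply_gaps
-- ===== SOURCE A (Python) =====
-- def apply_gaps(sequences, steps):
--
--     if steps is None:
--         return sequences
--
--     # Convert sequences to a list of lists for mutability
--     sequences = [list(seq) for seq in sequences]
--
--     for step in steps:
--         seq_idx, pos = step  # Unpack the step (sequence index, position)
--         # Adjust sequence index to 0-based
--         seq_idx_0based = seq_idx - 1
--
--         # Check if the sequence index and position are valid
--         if 0 <= seq_idx_0based < len(sequences) and 0 <= pos <= len(sequences[seq_idx_0based]):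
--             # Insert a gap ('-') at the specified position
--             sequences[seq_idx_0based].insert(pos, '-')
--
--     # Convert back to strings
--     sequences = [''.join(seq) for seq in sequences]
--     return sequences
-- ===== SOURCE B (Python) =====
-- def apply_gaps(sequences, steps):
--     if steps is None:
--         return sequences
--     n = len(sequences)
--     # Group the insert positions by target sequence (0-based), keeping encounter order.
--     gaps = {}
--     for seq_idx, pos in steps:
--         i0 = seq_idx - 1
--         if 0 <= i0 < n:
--             gaps.setdefault(i0, []).append(pos)
--     result = []
--     for i, seq in enumerate(sequences):
--         chars = list(seq)
--         for pos in gaps.get(i, []):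
--             if 0 <= pos <= len(chars):
--                 chars.insert(pos, '-')
--         result.append(''.join(chars))
--     return result
-- ===== Notes on version B (the rewrite author's own statement) =====
-- stated objective: alternative
-- what changed: B first groups the insert positions into a dict keyed by 0-based sequence index (one pass over steps), then applies each sequence's own ordered position list independently, instead of A's single interleaved pass mutating the sequence list step by step.
import Mathlib
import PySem

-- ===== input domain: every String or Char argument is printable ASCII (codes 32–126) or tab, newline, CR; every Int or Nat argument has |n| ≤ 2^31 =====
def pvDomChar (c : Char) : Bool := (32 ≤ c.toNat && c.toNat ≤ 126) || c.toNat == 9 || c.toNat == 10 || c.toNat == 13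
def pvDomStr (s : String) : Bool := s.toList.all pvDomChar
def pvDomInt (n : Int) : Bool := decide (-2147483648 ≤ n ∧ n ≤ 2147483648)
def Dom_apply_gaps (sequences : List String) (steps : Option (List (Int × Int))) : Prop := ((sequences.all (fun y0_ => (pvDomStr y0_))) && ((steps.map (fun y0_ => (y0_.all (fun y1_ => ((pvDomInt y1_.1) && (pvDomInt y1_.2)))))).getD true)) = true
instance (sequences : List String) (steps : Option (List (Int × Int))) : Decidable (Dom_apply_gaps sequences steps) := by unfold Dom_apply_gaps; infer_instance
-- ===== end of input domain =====

-- B groups the insert positions per target sequence first (dict index), then edits each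
-- sequence independently, instead of A's single interleaved mutating pass; objective: alternative.

-- ===== PORT A =====
/-- A-side helper: the body of A's `for step in steps` loop (one mutation step). -/
def stepA (ss : List (List Char)) (step : Int × Int) : List (List Char) :=
  let seq_idx_0based := step.1 - 1
  if 0 ≤ seq_idx_0based ∧ seq_idx_0based < (ss.length : Int) ∧
     0 ≤ step.2 ∧ step.2 ≤ ((PySem.List.pyGetD ss seq_idx_0based []).length : Int) then
    ss.set seq_idx_0based.toNat
      (PySem.List.insert (PySem.List.pyGetD ss seq_idx_0based []) step.2 '-')
  else ss

def apply_gaps (sequences : List String) (steps : Option (List (Int × Int))) : List String :=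
  match steps with
  | none => sequences
  | some st =>
    let ss := sequences.map String.toList
    let ss := st.foldl stepA ss
    ss.map (fun seq => String.mk seq)

-- ===== PORT B =====
def apply_gaps_alt (sequences : List String) (steps : Option (List (Int × Int))) : List String :=
  match steps with
  | none => sequences
  | some st =>
    let n : Int := sequences.length
    let gaps : PySem.Dict Int (List Int) :=
      st.foldl (fun d step =>
        let i0 := step.1 - 1
        if 0 ≤ i0 ∧ i0 < n then d.modify i0 [] (fun l => l ++ [step.2]) else d)
        PySem.Dict.empty
    (PySem.List.enumerate sequences).map (fun p =>
      String.mk ((gaps.getD p.1 []).foldl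
        (fun chars pos =>
          if 0 ≤ pos ∧ pos ≤ (chars.length : Int) then PySem.List.insert chars pos '-' else chars)
        p.2.toList))

-- ===== PRECONDITION & SPEC =====
def Spec_apply_gaps (sequences : List String) (steps : Option (List (Int × Int))) (out : List String) : Prop := out = apply_gaps_alt sequences steps
instance (sequences : List String) (steps : Option (List (Int × Int))) (out : List String) : Decidable (Spec_apply_gaps sequences steps out) := by unfold Spec_apply_gaps; infer_instance

-- ===== CLAIM (what is proved, stated in full; the proofs are below) =====
def Claim_equal_apply_gaps : Prop := ∀ (sequences : List String) (steps : Option (List (Int × Int))), Dom_apply_gaps sequences steps → Spec_apply_gaps sequences steps (apply_gaps sequences steps)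

-- ===== LEMMAS AND PROOFS =====

/-- One conditional gap insertion (shared shape of both loops' bodies). -/
def applyPos (chars : List Char) (pos : Int) : List Char :=
  if 0 ≤ pos ∧ pos ≤ (chars.length : Int) then PySem.List.insert chars pos '-' else chars

/-- The positions of the steps targeting sequence index `i` (0-based), in order. -/
def posOf (st : List (Int × Int)) (i : Int) : List Int :=
  (st.filter (fun s => s.1 - 1 == i)).map (·.2)

theorem posOf_cons (s : Int × Int) (st : List (Int × Int)) (i : Int) :
    posOf (s :: st) i = (if s.1 - 1 = i then [s.2] else []) ++ posOf st i := by
  simp [posOf, List.filter_cons]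
  split_ifs with h <;> simp_all

/-- Dict lemma: the grouping loop collects exactly `posOf` for each in-range index. -/
theorem getD_buildGaps (n : Int) (st : List (Int × Int)) (d : PySem.Dict Int (List Int))
    (i : Int) (h0 : 0 ≤ i) (h1 : i < n) :
    (st.foldl (fun d step =>
        let i0 := step.1 - 1
        if 0 ≤ i0 ∧ i0 < n then d.modify i0 [] (fun l => l ++ [step.2]) else d) d).getD i []
      = d.getD i [] ++ posOf st i := by
  induction st generalizing d with
  | nil => simp [posOf]
  | cons s st ih =>
    rw [List.foldl_cons, posOf_cons]
    by_cases hg : 0 ≤ s.1 - 1 ∧ s.1 - 1 < n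
    · rw [ih]
      simp only [hg, and_self, if_true]
      by_cases he : s.1 - 1 = i
      · subst he
        rw [PySem.Dict.getD_modify_self]
        simp
      · rw [PySem.Dict.getD_modify_of_ne _ _ _ (Ne.symm he)]
        simp [he]
    · rw [ih]
      simp only [hg, if_false]
      have : ¬ (s.1 - 1 = i) := by intro he; exact hg ⟨he ▸ h0, he ▸ h1⟩
      simp [this]

/-- One step of A's loop, described per index. -/
theorem stepA_eq (ss : List (List Char)) (s : Int × Int) :
    stepA ss s = ss.mapIdx (fun j cs => if s.1 - 1 = (j : Int) then applyPos cs s.2 else cs) := by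
  unfold stepA
  by_cases hidx : 0 ≤ s.1 - 1 ∧ s.1 - 1 < (ss.length : Int)
  · have hk : (s.1 - 1).toNat < ss.length := by omega
    have hkeq : ((s.1 - 1).toNat : Int) = s.1 - 1 := by omega
    have hget : PySem.List.pyGetD ss (s.1 - 1) [] = ss[(s.1 - 1).toNat] :=
      PySem.List.pyGetD_eq_getElem ss [] hidx.1 hidx.2
    by_cases hpos : 0 ≤ s.2 ∧ s.2 ≤ ((PySem.List.pyGetD ss (s.1 - 1) []).length : Int)
    · rw [if_pos ⟨hidx.1, hidx.2, hpos⟩]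
      apply List.ext_getElem
      · simp
      · intro j hj hj'
        rw [List.getElem_mapIdx, List.getElem_set]
        by_cases hji : j = (s.1 - 1).toNat
        · subst hji
          rw [if_pos rfl, if_pos (by omega), applyPos, if_pos (by rw [hget] at hpos; exact hpos),
            hget]
        · rw [if_neg (show ¬((s.1 - 1).toNat = j) by omega), if_neg (by omega)]
    · rw [if_neg (by intro h; exact hpos ⟨h.2.2.1, h.2.2.2⟩)]
      apply List.ext_getElem
      · simp
      · intro j hj hj'
        rw [List.getElem_mapIdx]
        by_cases hji : s.1 - 1 = (j : Int)
        · rw [if_pos hji, applyPos,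
            if_neg (by intro hc; apply hpos; rw [hget]
                       simp only [show (s.1 - 1).toNat = j from by omega]; exact hc)]
        · rw [if_neg hji]
  · rw [if_neg (by intro h; exact hidx ⟨h.1, h.2.1⟩)]
    apply List.ext_getElem
    · simp
    · intro j hj hj'
      rw [List.getElem_mapIdx,
        if_neg (by intro he; exact hidx ⟨by omega, by omega⟩)]

/-- Main lemma: A's interleaved pass equals the per-index folds over `posOf`. -/
theorem foldA_eq_mapIdx (st : List (Int × Int)) (ss : List (List Char)) :
    st.foldl stepA ss
      = ss.mapIdx (fun k chars => (posOf st (k : Int)).foldl applyPos chars) := by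
  induction st generalizing ss with
  | nil =>
    apply List.ext_getElem <;> simp [posOf]
  | cons s st ih =>
    rw [List.foldl_cons, ih, stepA_eq, List.mapIdx_mapIdx]
    congr 1
    funext j cs
    rw [posOf_cons]
    simp only [Function.comp_apply]
    by_cases hji : s.1 - 1 = (j : Int)
    · rw [if_pos hji, if_pos hji]
      rfl
    · rw [if_neg hji, if_neg hji, List.nil_append]

-- ===== VERDICT (by name: the statement is the Claim_ definition above) =====
theorem apply_gaps_spec : Claim_equal_apply_gaps := by
  intro sequences steps _
  unfold Spec_apply_gaps apply_gaps apply_gaps_alt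
  cases steps with
  | none => rfl
  | some st =>
    simp only
    rw [foldA_eq_mapIdx]
    apply List.ext_getElem
    · simp [PySem.List.length_enumerate]
    · intro j hj hj'
      have hjlen : j < sequences.length := by
        simpa [PySem.List.length_enumerate] using hj'
      rw [List.getElem_map, List.getElem_mapIdx, List.getElem_map,
        List.getElem_map, PySem.List.getElem_enumerate]
      simp only [Int.zero_add]
      rw [getD_buildGaps _ _ _ _ (by omega) (by exact_mod_cast hjlen)]
      rfl
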